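-- pv_equiv track=rewrite | github.com/ccf-yang/data_deal_gradio | qa/qa_pytest/common/generate_code/generate.py | get_max_keys
-- ===== SOURCE A (Python) =====
-- def get_max_keys(name,dictionary):
--     max_keys = []
--     max_count = 0
--
--     current_keys = list(dictionary.keys())
--     if len(current_keys) > max_count:
--         max_keys = current_keys
--         max_count = len(current_keys)
--
--     for key, value in dictionary.items():
--         if len(value) > max_count:
--             name = key
--             max_keys = value.split(',')
--             max_count = len(value)
--     return name, max_keys
-- ===== SOURCE B (Python) =====
-- def get_max_keys(name, dictionary):
--     ranked = sorted(dictionary.items(), key=lambda kv: len(kv[1]), reverse=True)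
--     if not ranked:
--         return name, []
--     best_key, best_val = ranked[0]
--     if len(best_val) > len(dictionary):
--         return best_key, best_val.split(',')
--     return name, list(dictionary.keys())
-- ===== Notes on version B (the rewrite author's own statement) =====
-- stated objective: alternative
-- what changed: Replaces A's single-pass running-max accumulator (name/max_keys/max_count mutated in one loop seeded with the keys list) by sort-then-pick: stably sort the items by value length in reverse (so the first maximal item comes first, matching A's strict-> tie-break), take the head, and one branch against the key count decides the result.
import Mathlib
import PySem

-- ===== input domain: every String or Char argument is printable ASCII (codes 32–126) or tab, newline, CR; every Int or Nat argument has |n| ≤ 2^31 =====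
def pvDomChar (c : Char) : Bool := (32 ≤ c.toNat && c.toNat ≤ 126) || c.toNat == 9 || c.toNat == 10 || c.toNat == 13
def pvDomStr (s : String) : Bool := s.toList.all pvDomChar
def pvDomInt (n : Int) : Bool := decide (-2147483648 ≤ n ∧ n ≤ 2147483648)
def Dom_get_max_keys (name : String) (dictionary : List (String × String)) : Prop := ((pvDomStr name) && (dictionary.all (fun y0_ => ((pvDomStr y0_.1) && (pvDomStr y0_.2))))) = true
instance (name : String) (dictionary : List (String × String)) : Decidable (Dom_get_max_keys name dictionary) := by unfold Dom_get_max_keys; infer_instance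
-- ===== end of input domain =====

-- B replaces A's running-max accumulator loop by sort-then-pick: stably sort the items
-- by value length in reverse and take the head (alternative algorithm, not faster).

-- ===== PORT A =====
-- value.split(',') — sep is the non-empty literal ",", so split? is always some; getD only discharges the Option
def splitComma (s : String) : List String := (PySem.Str.split? s ",").getD []

-- the body of A's for-loop, acting on the state (name, max_keys, max_count)
def aStep (st : String × List String × Int) (kv : String × String) : String × List String × Int :=
  if PySem.Str.len kv.2 > st.2.2 then (kv.1, splitComma kv.2, PySem.Str.len kv.2) else st

def get_max_keys (name : String) (dictionary : List (String × String)) : String × List String :=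
  let d := PySem.Dict.ofList dictionary
  let max_keys : List String := []
  let max_count : Int := 0
  let current_keys := d.keys
  let p :=
    if (current_keys.length : Int) > max_count then (current_keys, (current_keys.length : Int))
    else (max_keys, max_count)
  let st := d.items.foldl aStep (name, p.1, p.2)
  (st.1, st.2.1)

-- ===== PORT B =====
def get_max_keys_alt (name : String) (dictionary : List (String × String)) : String × List String :=
  let d := PySem.Dict.ofList dictionary
  let ranked := PySem.List.sorted d.items (fun kv => PySem.Str.len kv.2) true
  match ranked with     -- 'if not ranked: return name, []' then 'ranked[0]': the head of the sorted list
  | [] => (name, [])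
  | best :: _ =>
    if PySem.Str.len best.2 > (d.size : Int) then (best.1, (PySem.Str.split? best.2 ",").getD [])
    else (name, d.keys)

-- ===== PRECONDITION & SPEC =====
def Spec_get_max_keys (name : String) (dictionary : List (String × String)) (out : String × List String) : Prop := out = get_max_keys_alt name dictionary
instance (name : String) (dictionary : List (String × String)) (out : String × List String) : Decidable (Spec_get_max_keys name dictionary out) := by unfold Spec_get_max_keys; infer_instance

-- ===== CLAIM =====
def Claim_equal_get_max_keys : Prop := ∀ (name : String) (dictionary : List (String × String)), Dom_get_max_keys name dictionary → Spec_get_max_keys name dictionary (get_max_keys name dictionary)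

-- ===== LEMMAS AND PROOFS =====

-- the running first-max step over items, keyed by len of the value (first maximum wins)
def bStep (m x : String × String) : String × String :=
  if PySem.Str.len m.2 < PySem.Str.len x.2 then x else m

-- A's loop state as a function of the running best so far (K = the initial max_count)
def stateOf (n0 : String) (mk0 : List String) (K : Int) (b : String × String) :
    String × List String × Int :=
  if PySem.Str.len b.2 > K then (b.1, splitComma b.2, PySem.Str.len b.2) else (n0, mk0, K)

lemma aStep_stateOf (n0 : String) (mk0 : List String) (K : Int) (b kv : String × String) :
    aStep (stateOf n0 mk0 K b) kv = stateOf n0 mk0 K (bStep b kv) := by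
  simp only [aStep, stateOf, bStep]
  split_ifs <;> first | rfl | (exfalso; simp_all; omega)

lemma fold_stateOf (l : List (String × String)) (n0 : String) (mk0 : List String) (K : Int)
    (b : String × String) :
    l.foldl aStep (stateOf n0 mk0 K b) = stateOf n0 mk0 K (l.foldl bStep b) := by
  induction l generalizing b with
  | nil => rfl
  | cons h t ih => simp only [List.foldl_cons, aStep_stateOf, ih]

lemma aStep_init (n0 : String) (mk0 : List String) (K : Int) (h : String × String) :
    aStep (n0, mk0, K) h = stateOf n0 mk0 K h := by
  simp only [aStep, stateOf]

-- the reverse-stable insertion sort keeps the FIRST maximal element at the head: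
-- folding insertBy over a nonempty accumulator drives the head by the running first-max step
lemma head_foldl_insertBy (t : List (String × String)) (h : String × String)
    (r : List (String × String)) :
    ∃ r', t.foldl (fun acc x =>
        PySem.List.insertBy (fun a b => decide (PySem.Str.len b.2 < PySem.Str.len a.2)) x acc)
        (h :: r) = (t.foldl bStep h) :: r' := by
  induction t generalizing h r with
  | nil => exact ⟨r, rfl⟩
  | cons x t ih =>
    simp only [List.foldl_cons, PySem.List.insertBy, bStep]
    by_cases hc : PySem.Str.len h.2 < PySem.Str.len x.2
    · simp only [hc, decide_true, if_true]; exact ih x (h :: r)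
    · simp only [hc, decide_false, Bool.false_eq_true, if_false]; exact ih h _

-- the head of sorted(items, key=len∘snd, reverse=True) is the running first-max of items
lemma head_sorted_rev (h : String × String) (t : List (String × String)) :
    ∃ r', PySem.List.sorted (h :: t) (fun kv => PySem.Str.len kv.2) true
      = (t.foldl bStep h) :: r' := by
  rw [PySem.List.sorted_rev_eq_foldl_insertBy]
  simpa using head_foldl_insertBy t h []

-- ===== VERDICT =====
theorem get_max_keys_spec : Claim_equal_get_max_keys := by
  intro name dictionary _
  unfold Spec_get_max_keys get_max_keys get_max_keys_alt
  cases hl : (PySem.Dict.ofList dictionary).items with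
  | nil =>
      simp [hl, PySem.Dict.keys, PySem.List.sorted]
  | cons h t =>
      obtain ⟨r', hs⟩ := head_sorted_rev h t
      have hkl : ((PySem.Dict.ofList dictionary).keys.length : Int)
          = ((PySem.Dict.ofList dictionary).size : Int) := by
        simp [PySem.Dict.keys, PySem.Dict.size]
      have hpos : ((PySem.Dict.ofList dictionary).keys.length : Int) > (0 : Int) := by
        simp [PySem.Dict.keys, hl]
      have hp : (if ((PySem.Dict.ofList dictionary).keys.length : Int) > (0 : Int) then
            ((PySem.Dict.ofList dictionary).keys, ((PySem.Dict.ofList dictionary).keys.length : Int))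
          else (([] : List String), (0 : Int)))
          = ((PySem.Dict.ofList dictionary).keys, ((PySem.Dict.ofList dictionary).keys.length : Int)) :=
        if_pos hpos
      simp only [hl, hs, hp, List.foldl_cons]
      rw [aStep_init, fold_stateOf]
      simp only [stateOf, splitComma]
      rw [hkl]
      split_ifs <;> rfl
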